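-- pv_equiv track=rewrite | github.com/callmewenhao/leetcode | 基础算法精讲/二分/二分答案/minimizeArrayValue.py | minimizeArrayValue1
-- ===== SOURCE A (Python) =====
-- from typing import List
--
-- def minimizeArrayValue1(nums: List[int]) -> int:
--     def check(mx: int) -> bool:
--         # if mx < nums[0]:
--         #     return False
--         buf = nums.copy()
--         for i in range(len(buf) - 1, 0, -1):
--             dif = buf[i] - mx
--             if dif > 0:
--                 buf[i - 1] += dif
--         return buf[0] <= mx
--
--     l, r = nums[0], max(nums)
--     while l <= r:
--         m = l + (r - l) // 2
--         if check(m):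
--             r = m - 1
--         else:
--             l = m + 1
--     return l
-- ===== SOURCE B (Python) =====
-- from typing import List
--
-- def minimizeArrayValue1(nums: List[int]) -> int:
--     ans = nums[0]
--     s = 0
--     for i, x in enumerate(nums):
--         s += x
--         c = -(-s // (i + 1))  # ceil(s / (i+1))
--         if c > ans:
--             ans = c
--     return ans
-- ===== Notes on version B (the rewrite author's own statement) =====
-- stated objective: faster
-- what changed: Replaced the binary search over candidate maxima (each step re-simulating the O(n) redistribution check) by a single pass that returns the maximum over all prefixes of ceil(prefix_sum/(i+1)).
import Mathlib
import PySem

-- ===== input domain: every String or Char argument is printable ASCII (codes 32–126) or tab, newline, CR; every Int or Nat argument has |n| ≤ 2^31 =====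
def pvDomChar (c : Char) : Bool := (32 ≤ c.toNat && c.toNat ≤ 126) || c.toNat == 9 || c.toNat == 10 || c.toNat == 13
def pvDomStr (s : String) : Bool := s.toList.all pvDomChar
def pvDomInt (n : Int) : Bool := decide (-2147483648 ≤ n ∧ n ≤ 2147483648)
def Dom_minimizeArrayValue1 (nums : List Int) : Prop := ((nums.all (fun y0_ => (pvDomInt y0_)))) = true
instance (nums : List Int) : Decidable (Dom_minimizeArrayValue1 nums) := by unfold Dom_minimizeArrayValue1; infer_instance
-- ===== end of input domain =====

-- B replaces A's binary search (each probe re-running the O(n) redistribution check) by one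
-- linear pass taking the max over prefixes of ceil(prefix_sum/(i+1)); measured faster (asymptotic).


-- ===== PORT A =====
-- the inner 'check(mx)': copy buf, loop i from len-1 down to 1 pushing overflow left, test buf[0] <= mx
def pvCheck (nums : List Int) (mx : Int) : Bool :=
  let buf :=
    (PySem.List.pyRange ((nums.length : Int) - 1) 0 (-1)).foldl
      (fun buf i =>
        let dif := PySem.List.pyGetD buf i 0 - mx
        if dif > 0 then
          PySem.List.pySetD buf (i - 1) (PySem.List.pyGetD buf (i - 1) 0 + dif)
        else buf)
      nums
  decide (PySem.List.pyGetD buf 0 0 ≤ mx)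

-- the 'while l <= r' binary-search loop
def pvLoop (nums : List Int) (l r : Int) : Int :=
  if h : l ≤ r then
    let m := l + PySem.Int.floordiv (r - l) 2
    if pvCheck nums m then pvLoop nums l (m - 1) else pvLoop nums (m + 1) r
  else l
termination_by (r + 1 - l).toNat
decreasing_by
  all_goals
    have h2 := PySem.Int.floordiv_eq_ediv_of_pos (a := r - l) (b := 2) (by norm_num)
    simp only [h2] at *
    omega

def minimizeArrayValue1 (nums : List Int) : Int :=
  match PySem.List.pyGet? nums 0, PySem.List.max? nums (fun y => y) with
  | some l, some r => pvLoop nums l r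
  | _, _ => 0   -- unreachable under Pre_ (nums ≠ []); Python raises IndexError/ValueError here

-- ===== PORT B =====
def minimizeArrayValue1_alt (nums : List Int) : Int :=
  match PySem.List.pyGet? nums 0 with
  | some a0 =>
    ((PySem.List.enumerate nums 0).foldl
      (fun (st : Int × Int) ix =>
        let s := st.2 + ix.2
        let c := -(PySem.Int.floordiv (-s) (ix.1 + 1))
        (if c > st.1 then c else st.1, s))
      (a0, 0)).1
  | none => 0   -- unreachable under Pre_ (nums ≠ []); Python raises IndexError here

-- ===== PRECONDITION & SPEC =====
-- A evaluates nums[0], raising IndexError on the empty list (B does too): [] is excluded.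
def Pre_minimizeArrayValue1 (nums : List Int) : Prop := nums ≠ []
instance (nums : List Int) : Decidable (Pre_minimizeArrayValue1 nums) := by
  unfold Pre_minimizeArrayValue1; infer_instance
def pvWitness_minimizeArrayValue1 : List Int := [3, 7, 1, 6]

def Spec_minimizeArrayValue1 (nums : List Int) (out : Int) : Prop := out = minimizeArrayValue1_alt nums
instance (nums : List Int) (out : Int) : Decidable (Spec_minimizeArrayValue1 nums out) := by
  unfold Spec_minimizeArrayValue1; infer_instance

-- ===== CLAIM (what is proved, stated in full; the proofs are below) =====
def Claim_equal_minimizeArrayValue1 : Prop := ∀ (nums : List Int), Dom_minimizeArrayValue1 nums → Pre_minimizeArrayValue1 nums → Spec_minimizeArrayValue1 nums (minimizeArrayValue1 nums)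

-- ===== LEMMAS AND PROOFS =====

-- carry pushed left out of a suffix by A's check loop
def pvCC (mx : Int) : List Int → Int
  | [] => 0
  | x :: xs => max (x + pvCC mx xs - mx) 0

-- "every prefix sum is at most (its length) * mx" — both programs are characterised by this
def pvGood (nums : List Int) (mx : Int) : Prop :=
  ∀ j : Nat, j < nums.length → (nums.take (j + 1)).sum ≤ ((j : Int) + 1) * mx

lemma pvCC_le (mx c : Int) (xs : List Int) :
    pvCC mx xs ≤ c ↔ 0 ≤ c ∧ ∀ j : Nat, j < xs.length →
      (xs.take (j + 1)).sum - ((j : Int) + 1) * mx ≤ c := by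
  induction xs generalizing c with
  | nil => simp [pvCC]
  | cons x xs ih =>
    simp only [pvCC, max_le_iff]
    constructor
    · rintro ⟨h1, h0⟩
      have := (ih (c := c + mx - x)).mp (by omega)
      refine ⟨h0, ?_⟩
      rintro (_ | j) hj
      · simp; omega
      · have hb := this.2 j (by simpa using hj)
        simp only [List.take_succ_cons, List.sum_cons]
        have hr : ((j:Int)+1+1)*mx = ((j:Int)+1)*mx + mx := by ring
        push_cast at hb ⊢
        omega
    · rintro ⟨h0, hall⟩
      have h1 := hall 0 (by simp)
      simp at h1
      have : pvCC mx xs ≤ c + mx - x := by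
        apply (ih (c := c + mx - x)).mpr
        refine ⟨by omega, ?_⟩
        intro j hj
        have hb := hall (j + 1) (by simpa using hj)
        simp only [List.take_succ_cons, List.sum_cons] at hb
        have hr : ((j:Int)+1+1)*mx = ((j:Int)+1)*mx + mx := by ring
        push_cast at hb ⊢
        omega
      omega

lemma pvCC_merge (mx a b : Int) (l : List Int) :
    pvCC mx (l ++ [a + max (b - mx) 0]) = pvCC mx (l ++ [a, b]) := by
  induction l with
  | nil => simp [pvCC]
  | cons y l ih => simp [pvCC, ih]

lemma pvTakeOne (l : List Int) (k : Nat) (h : k < l.length) :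
    l.take (k + 1) = l.take k ++ [l.getD k 0] := by
  induction l generalizing k with
  | nil => simp at h
  | cons a t ih =>
    cases k with
    | zero => simp
    | succ k => simp only [List.take_succ_cons, List.getD_cons_succ, List.cons_append,
        ih k (by simpa using h)]

lemma pvSetTake (l : List Int) (k : Nat) (v : Int) (h : k < l.length) :
    (l.set k v).take (k + 1) = l.take k ++ [v] := by
  induction l generalizing k with
  | nil => simp at h
  | cons a t ih =>
    cases k with
    | zero => simp
    | succ k => simp only [List.set_cons_succ, List.take_succ_cons, List.cons_append,
        ih k (by simpa using h)]

-- the final buf[0] of A's check loop, run down from index j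
lemma pvCheck_loop (mx : Int) (buf : List Int) (j : Nat) (hj : j < buf.length) :
    PySem.List.pyGetD
      ((PySem.List.pyRange (j : Int) 0 (-1)).foldl
        (fun buf i =>
          if PySem.List.pyGetD buf i 0 - mx > 0 then
            PySem.List.pySetD buf (i - 1)
              (PySem.List.pyGetD buf (i - 1) 0 + (PySem.List.pyGetD buf i 0 - mx))
          else buf)
        buf) 0 0
      = buf.headD 0 + pvCC mx (buf.tail.take j) := by
  induction j generalizing buf with
  | zero =>
    rw [PySem.List.pyRange_neg_one_eq_nil (by omega)]
    simp [pvCC, PySem.List.pyGetD_zero]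
    cases buf <;> simp
  | succ j ih =>
    rw [show ((j+1:Nat):Int) = (j:Int) + 1 from by push_cast; ring]
    rw [PySem.List.pyRange_neg_one_cons (by omega)]
    simp only [List.foldl_cons]
    cases buf with
    | nil => simp at hj
    | cons x rest =>
      rw [show (j:Int) + 1 - 1 = ((j:Nat):Int) from by ring]
      simp only [PySem.List.pyGetD_natCast, PySem.List.pySetD_natCast,
        show ((j:Int) + 1) = ((j+1:Nat):Int) from by push_cast; ring]
      have hlen : j + 1 < rest.length + 1 := by simpa using hj
      have hjr : j < rest.length := by omega
      by_cases hd : (x :: rest).getD (j+1) 0 - mx > 0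
      · rw [if_pos hd]
        rw [ih _ (by simp; omega)]
        cases j with
        | zero =>
          cases rest with
          | nil => simp at hlen
          | cons r0 rs =>
            simp only [List.getD_cons_succ, List.getD_cons_zero] at hd ⊢
            simp [pvCC]
            omega
        | succ k =>
          simp only [List.set_cons_succ, List.headD_cons, List.tail_cons,
            List.getD_cons_succ] at *
          congr 1
          rw [pvSetTake rest k _ (by omega), pvTakeOne rest (k+1) (by omega),
            pvTakeOne rest k (by omega), List.append_assoc]
          have hm := pvCC_merge mx (rest.getD k 0) (rest.getD (k+1) 0) (rest.take k)
          rw [show rest.getD k 0 + (rest.getD (k+1) 0 - mx)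
              = rest.getD k 0 + max (rest.getD (k+1) 0 - mx) 0 from by omega]
          simpa using hm
      · rw [if_neg hd]
        rw [ih _ (by simp; omega)]
        cases j with
        | zero =>
          cases rest with
          | nil => simp at hlen
          | cons r0 rs =>
            simp only [List.getD_cons_succ, List.getD_cons_zero] at hd ⊢
            simp [pvCC]
            omega
        | succ k =>
          simp only [List.headD_cons, List.tail_cons, List.getD_cons_succ] at *
          congr 1
          rw [pvTakeOne rest (k+1) (by omega), pvTakeOne rest k (by omega),
            List.append_assoc]
          have hm := pvCC_merge mx (rest.getD k 0) (rest.getD (k+1) 0) (rest.take k)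
          rw [show rest.getD k 0 + max (rest.getD (k+1) 0 - mx) 0 = rest.getD k 0
              from by omega] at hm
          simpa using hm

-- head + carry ≤ mx, rephrased through pvGood
lemma pvVal_iff (x mx : Int) (xs : List Int) :
    x + pvCC mx xs ≤ mx ↔ pvGood (x :: xs) mx := by
  rw [show (x + pvCC mx xs ≤ mx) ↔ pvCC mx xs ≤ mx - x from by omega, pvCC_le]
  constructor
  · rintro ⟨h0, hall⟩
    rintro (_ | j) hj
    · simp; omega
    · have hb := hall j (by simpa using hj)
      simp only [List.take_succ_cons, List.sum_cons]
      have hr : ((j:Int)+1+1)*mx = ((j:Int)+1)*mx + mx := by ring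
      push_cast at hb ⊢
      omega
  · intro hg
    have h0 := hg 0 (by simp)
    simp at h0
    refine ⟨by omega, ?_⟩
    intro j hj
    have hb := hg (j + 1) (by simpa using hj)
    simp only [List.take_succ_cons, List.sum_cons] at hb
    have hr : ((j:Int)+1+1)*mx = ((j:Int)+1)*mx + mx := by ring
    push_cast at hb ⊢
    omega

lemma pvCheck_iff (x mx : Int) (xs : List Int) :
    pvCheck (x :: xs) mx = true ↔ pvGood (x :: xs) mx := by
  have hl : (((x :: xs).length : Int) - 1) = ((xs.length : Nat) : Int) := by
    simp
  simp only [pvCheck, hl, decide_eq_true_eq]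
  rw [pvCheck_loop mx (x :: xs) xs.length (by simp)]
  simp only [List.headD_cons, List.tail_cons, List.take_length]
  exact pvVal_iff x mx xs

lemma pvCeil_le (t d mx : Int) (hd : 0 < d) :
    -(PySem.Int.floordiv (-t) d) ≤ mx ↔ t ≤ mx * d := by
  have h := PySem.Int.le_floordiv_iff_mul_le (q := -mx) (a := -t) (b := d) hd
  constructor
  · intro hx
    have : -mx * d ≤ -t := h.mp (by omega)
    nlinarith
  · intro hx
    have : -mx ≤ PySem.Int.floordiv (-t) d := h.mpr (by nlinarith)
    omega

-- B's running fold, characterised by ≤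
lemma pvFold_le (xs : List Int) (i0 : Nat) (ans s mx : Int) :
    ((PySem.List.enumerate xs (i0 : Int)).foldl
      (fun (st : Int × Int) ix =>
        (if -(PySem.Int.floordiv (-(st.2 + ix.2)) (ix.1 + 1)) > st.1
         then -(PySem.Int.floordiv (-(st.2 + ix.2)) (ix.1 + 1)) else st.1, st.2 + ix.2))
      (ans, s)).1 ≤ mx
    ↔ ans ≤ mx ∧ ∀ j : Nat, j < xs.length →
        s + (xs.take (j + 1)).sum ≤ ((i0 : Int) + (j : Int) + 1) * mx := by
  induction xs generalizing i0 ans s with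
  | nil => simp [PySem.List.enumerate]
  | cons x xs ih =>
    have hstep : PySem.List.enumerate (x :: xs) (i0 : Int)
        = ((i0 : Int), x) :: PySem.List.enumerate xs (((i0+1 : Nat)) : Int) := by
      simp [PySem.List.enumerate]
    rw [hstep, List.foldl_cons]
    rw [ih (i0 + 1)]
    have hceil : -(PySem.Int.floordiv (-(s + x)) ((i0 : Int) + 1)) ≤ mx ↔
        s + x ≤ mx * ((i0 : Int) + 1) := pvCeil_le _ _ _ (by positivity)
    constructor
    · rintro ⟨h1, h2⟩
      have hc : (if -(PySem.Int.floordiv (-(s + x)) ((i0:Int) + 1)) > ans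
          then -(PySem.Int.floordiv (-(s + x)) ((i0:Int) + 1)) else ans) ≤ mx := h1
      have hans : ans ≤ mx := by split_ifs at hc with hh; omega; omega
      have hcl : s + x ≤ mx * ((i0:Int) + 1) := by
        apply hceil.mp; split_ifs at hc with hh <;> omega
      refine ⟨hans, ?_⟩
      rintro (_ | j) hj
      · simpa [mul_comm] using hcl
      · have := h2 j (by simpa using hj)
        simp only [List.take_succ_cons, List.sum_cons]
        have : ((i0:Int) + 1 + (j:Int) + 1) * mx = ((i0:Int) + ((j:Int)+1) + 1) * mx := by
          ring
        push_cast at *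
        omega
    · rintro ⟨hans, hall⟩
      have h0 := hall 0 (by simp)
      simp at h0
      have hcl : s + x ≤ mx * ((i0:Int) + 1) := by rw [mul_comm]; exact h0
      refine ⟨?_, ?_⟩
      · split_ifs with hh
        · exact hceil.mpr hcl
        · exact hans
      · intro j hj
        have hb := hall (j + 1) (by simpa using hj)
        simp only [List.take_succ_cons, List.sum_cons] at hb
        have hr : ((i0:Int) + ((j:Int)+1) + 1) * mx = ((i0:Int) + 1 + (j:Int) + 1) * mx := by
          ring
        push_cast at hb ⊢
        omega

lemma pvAlt_le (x mx : Int) (xs : List Int) :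
    minimizeArrayValue1_alt (x :: xs) ≤ mx ↔ pvGood (x :: xs) mx := by
  simp only [minimizeArrayValue1_alt, PySem.List.pyGet?_zero_cons]
  rw [show (0 : Int) = ((0 : Nat) : Int) from rfl, pvFold_le]
  constructor
  · rintro ⟨_, hall⟩
    intro j hj
    have := hall j hj
    simpa using this
  · intro hg
    have h0 := hg 0 (by simp)
    simp at h0
    refine ⟨by omega, ?_⟩
    intro j hj
    simpa using hg j hj

lemma pvLoop_eq (nums : List Int) (F : Int)
    (hch : ∀ m : Int, pvCheck nums m = true ↔ F ≤ m) :
    ∀ (l r : Int), l ≤ F → F ≤ r + 1 → pvLoop nums l r = F := by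
  have H : ∀ (n : Nat) (l r : Int), (r + 1 - l).toNat = n → l ≤ F → F ≤ r + 1 →
      pvLoop nums l r = F := by
    intro n
    induction n using Nat.strong_induction_on with
    | _ n ih =>
      intro l r hn hl hr
      rw [pvLoop]
      by_cases h : l ≤ r
      · rw [dif_pos h]
        have hfd := PySem.Int.floordiv_eq_ediv_of_pos (a := r - l) (b := 2) (by norm_num)
        have hml : l ≤ l + PySem.Int.floordiv (r - l) 2 ∧
            l + PySem.Int.floordiv (r - l) 2 ≤ r := by rw [hfd]; omega
        set m := l + PySem.Int.floordiv (r - l) 2 with hm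
        by_cases hc : pvCheck nums m = true
        · simp only [hc, if_true]
          have hFm : F ≤ m := (hch m).mp hc
          exact ih ((m - 1) + 1 - l).toNat (by omega) l (m - 1) rfl hl (by omega)
        · simp only [Bool.not_eq_true] at hc
          simp only [hc]
          have hFm : ¬ F ≤ m := fun hf => by simp [(hch m).mpr hf] at hc
          exact ih (r + 1 - (m + 1)).toNat (by omega) (m + 1) r rfl (by omega) hr
      · rw [dif_neg h]; omega
  exact fun l r => H (r + 1 - l).toNat l r rfl

-- ===== VERDICT (by name: the statement is the Claim_ definition above) =====
theorem minimizeArrayValue1_spec : Claim_equal_minimizeArrayValue1 := by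
  unfold Claim_equal_minimizeArrayValue1
  intro nums _ hpre
  unfold Spec_minimizeArrayValue1
  cases nums with
  | nil => exact absurd rfl hpre
  | cons x xs =>
    set F := minimizeArrayValue1_alt (x :: xs) with hF
    have hch : ∀ m : Int, pvCheck (x :: xs) m = true ↔ F ≤ m := fun m =>
      (pvCheck_iff x m xs).trans (pvAlt_le x m xs).symm
    have hxF : x ≤ F := by
      have hg := (pvAlt_le x F xs).mp le_rfl
      have := hg 0 (by simp)
      simp at this
      omega
    have hmaxeq : PySem.List.max? (x :: xs) (fun y => y) = some (xs.foldl max x) :=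
      PySem.List.max?_id_cons x xs
    have hmax := PySem.List.max?_isMax hmaxeq
    have hFM : F ≤ xs.foldl max x := by
      apply (pvAlt_le x (xs.foldl max x) xs).mpr
      intro j hj
      have hj2 : j < xs.length + 1 := by simpa using hj
      have hlen : ((x :: xs).take (j + 1)).length = j + 1 := by
        simp only [List.length_take, List.length_cons]; omega
      have hsum := List.sum_le_card_nsmul ((x :: xs).take (j + 1)) (xs.foldl max x)
        (fun y hy => hmax y (List.mem_of_mem_take hy))
      rw [hlen] at hsum
      calc ((x :: xs).take (j + 1)).sum ≤ (j + 1) • (xs.foldl max x) := hsum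
        _ = ((j : Int) + 1) * (xs.foldl max x) := by push_cast [nsmul_eq_mul]; ring
    simp only [minimizeArrayValue1, PySem.List.pyGet?_zero_cons, hmaxeq]
    exact pvLoop_eq (x :: xs) F hch x (xs.foldl max x) hxF (by omega)
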